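-- pv_equiv track=rewrite | github.com/andrewcousins7/adventofcode | 2021/17/trickshot.py | isValidXVelocity
-- ===== SOURCE A (Python) =====
-- targetXMin = 241
--
-- targetXMax = 273
--
-- drag = -1
--
-- def adjustXVelocity(velocityX):
--     if velocityX > 0:
--         velocityX += drag
--     elif velocityX < 0:
--         velocityX -= drag
--     return velocityX
--
-- def isValidXVelocity(velocityX):
--     xPos = 0
--     while xPos <= targetXMax:
--         if xPos >= targetXMin:
--             return True
--         elif velocityX == 0:
--             return False
--         xPos += velocityX
--         velocityX = adjustXVelocity(velocityX)
--     return False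
-- ===== SOURCE B (Python) =====
-- def isValidXVelocity(velocityX):
--     v = velocityX
--     if v <= 0:
--         return False
--     # doubled position after k steps: 2*S(k) = k*(2*v+1-k); target band doubled: [482, 546]
--     if v * (v + 1) < 482:      # resting position falls short of the target
--         return False
--     lo, hi = 1, v              # binary search: smallest k with doubled position >= 482
--     while lo < hi:
--         mid = (lo + hi) // 2
--         if mid * (2 * v + 1 - mid) >= 482:
--             hi = mid
--         else:
--             lo = mid + 1
--     return lo * (2 * v + 1 - lo) <= 546
-- ===== Notes on version B (the rewrite author's own statement) =====
-- stated objective: faster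
-- what changed: Replaces the step-by-step trajectory simulation with a closed-form doubled-position formula k*(2v+1-k): nonpositive velocities and short resting positions are rejected arithmetically, and otherwise a binary search finds the first step reaching the target band.
import Mathlib
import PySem

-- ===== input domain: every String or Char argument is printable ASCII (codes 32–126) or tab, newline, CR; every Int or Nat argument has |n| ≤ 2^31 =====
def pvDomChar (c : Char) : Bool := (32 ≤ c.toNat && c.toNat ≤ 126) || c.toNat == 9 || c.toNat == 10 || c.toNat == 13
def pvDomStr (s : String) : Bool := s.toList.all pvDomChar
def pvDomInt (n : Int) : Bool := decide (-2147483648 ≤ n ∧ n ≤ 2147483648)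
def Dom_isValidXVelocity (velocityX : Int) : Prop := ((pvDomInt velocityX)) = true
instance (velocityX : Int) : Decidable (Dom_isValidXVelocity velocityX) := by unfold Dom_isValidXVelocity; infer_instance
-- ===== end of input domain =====

-- B replaces A's step-by-step simulation by a closed-form position formula plus a binary
-- search for the first step that reaches the target band; asymptotically fewer iterations.

-- ===== PORT A =====
def targetXMin : Int := 241
def targetXMax : Int := 273
def drag : Int := -1

def adjustXVelocity (velocityX : Int) : Int :=
  if velocityX > 0 then velocityX + drag
  else if velocityX < 0 then velocityX - drag
  else velocityX

theorem adjust_natAbs_lt (v : Int) (h : v ≠ 0) : (adjustXVelocity v).natAbs < v.natAbs := by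
  simp only [adjustXVelocity, drag]; split <;> [skip; split] <;> omega

-- the while loop of A, state (xPos, velocityX)
def isValidXVelocityLoop (xPos velocityX : Int) : Bool :=
  if xPos ≤ targetXMax then
    if xPos ≥ targetXMin then true
    else if velocityX = 0 then false
    else isValidXVelocityLoop (xPos + velocityX) (adjustXVelocity velocityX)
  else false
termination_by velocityX.natAbs
decreasing_by exact adjust_natAbs_lt _ (by assumption)

def isValidXVelocity (velocityX : Int) : Bool := isValidXVelocityLoop 0 velocityX

-- ===== PORT B =====
-- binary search: smallest k in [lo, hi] with doubled position k*(2v+1-k) >= 482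
def bsearchK (v lo hi : Int) : Int :=
  if lo < hi then
    let mid := PySem.Int.floordiv (lo + hi) 2
    if mid * (2 * v + 1 - mid) ≥ 482 then bsearchK v lo mid
    else bsearchK v (mid + 1) hi
  else lo
termination_by (hi - lo).toNat
decreasing_by
  all_goals
    have h1 := (PySem.Int.floordiv_two_mid_bounds (lo := lo) (hi := hi) (by omega)).1
    have h2 : PySem.Int.floordiv (lo + hi) 2 < hi := by
      rw [PySem.Int.floordiv_lt_iff_lt_mul (by omega)]; omega
    omega

def isValidXVelocity_alt (velocityX : Int) : Bool :=
  if velocityX ≤ 0 then false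
  else if velocityX * (velocityX + 1) < 482 then false
  else
    let lo := bsearchK velocityX 1 velocityX
    lo * (2 * velocityX + 1 - lo) ≤ 546

-- ===== PRECONDITION & SPEC =====
def Spec_isValidXVelocity (velocityX : Int) (out : Bool) : Prop := out = isValidXVelocity_alt velocityX
instance (velocityX : Int) (out : Bool) : Decidable (Spec_isValidXVelocity velocityX out) := by unfold Spec_isValidXVelocity; infer_instance

-- ===== CLAIM (what is proved, stated in full; the proofs are below) =====
def Claim_equal_isValidXVelocity : Prop := ∀ (velocityX : Int), Dom_isValidXVelocity velocityX → Spec_isValidXVelocity velocityX (isValidXVelocity velocityX)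

-- ===== LEMMAS AND PROOFS =====

-- doubled position after k steps (launch velocity v): 2 * S(k) = k*(2v+1-k)
def P (v k : Int) : Int := k * (2 * v + 1 - k)

theorem P_mono {v j k : Int} (hj : 0 ≤ j) (hjk : j ≤ k) (hk : k ≤ v) : P v j ≤ P v k := by
  unfold P; nlinarith [mul_nonneg (sub_nonneg.2 hjk) (by nlinarith : (0:Int) ≤ 2 * v + 1 - k - j)]

-- A never hits with nonpositive velocity and position below the target
theorem loopA_nonpos (n : Nat) (xPos v : Int) (hv : v ≤ 0) (hx : xPos < 241)
    (hn : v.natAbs ≤ n) : isValidXVelocityLoop xPos v = false := by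
  induction n generalizing xPos v with
  | zero =>
    have h0 : v = 0 := by omega
    subst h0
    rw [isValidXVelocityLoop]
    simp only [targetXMin, targetXMax]
    split_ifs <;> first | rfl | omega
  | succ n ih =>
    rw [isValidXVelocityLoop]
    simp only [targetXMin, targetXMax]
    split_ifs with h1 h2 h3
    · omega
    · rfl
    · refine ih _ _ (by simp only [adjustXVelocity, drag]; split_ifs <;> omega)
        (by omega) (by have := adjust_natAbs_lt v h3; omega)
    · rfl

theorem adjust_pos {v j : Int} (h : j < v) : adjustXVelocity (v - j) = v - (j + 1) := by
  simp only [adjustXVelocity, drag]; rw [if_pos (by omega)]; ring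

-- A's loop characterised: from the state after j steps, result ⟺ some later step lands in the band
theorem loopA_char (n : Nat) (v j xPos : Int) (hv : 1 ≤ v) (hj : 0 ≤ j) (hjv : j ≤ v)
    (hx : 2 * xPos = P v j) (hn : (v - j).toNat ≤ n) :
    isValidXVelocityLoop xPos (v - j) = true ↔
      ∃ k, j ≤ k ∧ k ≤ v ∧ 482 ≤ P v k ∧ P v k ≤ 546 := by
  induction n generalizing j xPos with
  | zero =>
    have hjv' : j = v := by omega
    rw [isValidXVelocityLoop]
    have hd : v - j = 0 := by omega
    rw [hd]
    simp only [targetXMin, targetXMax]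
    split_ifs with h1 h2
    · simp only [true_iff]
      exact ⟨j, le_refl _, hjv, by omega, by omega⟩
    · simp only [false_iff]
      rintro ⟨k, hk1, hk2, hk3, hk4⟩
      have hkj : k = j := by omega
      subst hkj; omega
    · simp only [false_iff]
      rintro ⟨k, hk1, hk2, hk3, hk4⟩
      have hkj : k = j := by omega
      subst hkj; omega
  | succ n ih =>
    by_cases hjv' : j = v
    · exact ih j xPos hj hjv hx (by omega)
    have hlt : j < v := lt_of_le_of_ne hjv hjv'
    rw [isValidXVelocityLoop]
    simp only [targetXMin, targetXMax]
    split_ifs with h1 h2 h3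
    · simp only [true_iff]
      exact ⟨j, le_refl _, hjv, by omega, by omega⟩
    · omega
    · have hxs : 2 * (xPos + (v - j)) = P v (j + 1) := by unfold P at *; nlinarith
      rw [adjust_pos hlt, ih (j + 1) _ (by omega) (by omega) hxs (by omega)]
      constructor
      · rintro ⟨k, hk1, hk2, hk3, hk4⟩; exact ⟨k, by omega, hk2, hk3, hk4⟩
      · rintro ⟨k, hk1, hk2, hk3, hk4⟩
        refine ⟨k, ?_, hk2, hk3, hk4⟩
        rcases lt_or_ge j k with h | h
        · omega
        · have : k = j := by omega
          subst this; omega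
    · simp only [false_iff]
      rintro ⟨k, hk1, hk2, hk3, hk4⟩
      have := P_mono (v := v) hj hk1 hk2
      omega

theorem bsearchK_unfold (v lo hi : Int) (h : lo < hi) :
    bsearchK v lo hi =
      if PySem.Int.floordiv (lo + hi) 2 * (2 * v + 1 - PySem.Int.floordiv (lo + hi) 2) ≥ 482
      then bsearchK v lo (PySem.Int.floordiv (lo + hi) 2)
      else bsearchK v (PySem.Int.floordiv (lo + hi) 2 + 1) hi := by
  rw [bsearchK, if_pos h]

-- the binary search returns the least k in [lo, hi] whose doubled position reaches 482
theorem bsearchK_spec (n : Nat) (v lo hi : Int) (hlo : 1 ≤ lo) (hlh : lo ≤ hi) (hhv : hi ≤ v)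
    (hP : 482 ≤ P v hi) (hlow : ∀ t, 1 ≤ t → t < lo → P v t < 482) (hn : (hi - lo).toNat ≤ n) :
    lo ≤ bsearchK v lo hi ∧ bsearchK v lo hi ≤ hi ∧ 482 ≤ P v (bsearchK v lo hi) ∧
      ∀ t, 1 ≤ t → t < bsearchK v lo hi → P v t < 482 := by
  induction n generalizing lo hi with
  | zero =>
    have he : lo = hi := by omega
    subst he
    rw [bsearchK, if_neg (by omega)]
    exact ⟨le_refl _, le_refl _, hP, hlow⟩
  | succ n ih =>
    by_cases hlt : lo < hi
    · have hmid := PySem.Int.floordiv_two_mid_bounds (lo := lo) (hi := hi) (by omega)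
      have hmhi : PySem.Int.floordiv (lo + hi) 2 < hi := by
        rw [PySem.Int.floordiv_lt_iff_lt_mul (by omega)]; omega
      rw [bsearchK_unfold v lo hi hlt]
      set mid := PySem.Int.floordiv (lo + hi) 2 with hm
      split_ifs with hc
      · have hPm : 482 ≤ P v mid := by unfold P; omega
        have := ih lo mid hlo (by omega) (by omega) hPm hlow (by omega)
        exact ⟨this.1, by omega, this.2.2.1, this.2.2.2⟩
      · have hlow' : ∀ t, 1 ≤ t → t < mid + 1 → P v t < 482 := by
          intro t h1 h2
          rcases lt_or_ge t lo with h | h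
          · exact hlow t h1 h
          · have hmono : P v t ≤ P v mid := P_mono (by omega) (by omega) (by omega)
            unfold P at *; omega
        have := ih (mid + 1) hi (by omega) (by omega) hhv hP hlow' (by omega)
        exact ⟨by omega, this.2.1, this.2.2.1, this.2.2.2⟩
    · rw [bsearchK, if_neg hlt]
      have he : lo = hi := by omega
      exact ⟨le_refl _, hlh, by rw [he]; exact hP, hlow⟩

-- ===== VERDICT (by name: the statement is the Claim_ definition above) =====
theorem isValidXVelocity_spec : Claim_equal_isValidXVelocity := by
  intro v _
  unfold Spec_isValidXVelocity isValidXVelocity isValidXVelocity_alt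
  by_cases hv : v ≤ 0
  · rw [if_pos hv]
    exact loopA_nonpos v.natAbs 0 v hv (by omega) (le_refl _)
  push_neg at hv
  rw [if_neg (by omega)]
  have hchar := loopA_char (v - 0).toNat v 0 0 hv (le_refl _) (by omega)
    (by unfold P; ring) (le_refl _)
  simp only [sub_zero] at hchar
  have hPvv : P v v = v * (v + 1) := by unfold P; ring
  by_cases hshort : v * (v + 1) < 482
  · rw [if_pos hshort]
    rw [Bool.eq_false_iff]
    intro htrue
    rcases hchar.mp htrue with ⟨k, hk1, hk2, hk3, hk4⟩
    have := P_mono hk1 hk2 (le_refl v)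
    omega
  · rw [if_neg hshort]
    push_neg at hshort
    have hb := bsearchK_spec (v - 1).toNat v 1 v (le_refl _) hv (le_refl _) (by omega)
      (by intro t h1 h2; omega) (le_refl _)
    show isValidXVelocityLoop 0 v =
      decide (bsearchK v 1 v * (2 * v + 1 - bsearchK v 1 v) ≤ 546)
    set r := bsearchK v 1 v with hr
    by_cases hle : r * (2 * v + 1 - r) ≤ 546
    · rw [decide_eq_true hle]
      exact hchar.mpr ⟨r, by omega, hb.2.1, hb.2.2.1, by unfold P at *; omega⟩
    · rw [decide_eq_false hle, Bool.eq_false_iff]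
      intro htrue
      rcases hchar.mp htrue with ⟨k, hk1, hk2, hk3, hk4⟩
      have hk1' : 1 ≤ k := by
        by_contra h
        have : k = 0 := by omega
        subst this; unfold P at hk3; omega
      have hrk : r ≤ k := by
        by_contra h
        push_neg at h
        have := hb.2.2.2 k hk1' h
        omega
      have := P_mono (v := v) (j := r) (by omega) hrk hk2
      unfold P at *; omega
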